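-- pv_equiv track=rewrite | github.com/RobertWoodCurrentHealth/Wearable-Device-ATSAM4C32-Hex-To-ASCII-Tool | SAM4_HexToText.py | get_crc_from_string
-- ===== SOURCE A (Python) =====
-- crc16tab =  [
--     0x0000, 0xC0C1, 0xC181, 0x0140, 0xC301, 0x03C0, 0x0280, 0xC241,
--     0xC601, 0x06C0, 0x0780, 0xC741, 0x0500, 0xC5C1, 0xC481, 0x0440,
--     0xCC01, 0x0CC0, 0x0D80, 0xCD41, 0x0F00, 0xCFC1, 0xCE81, 0x0E40,
--     0x0A00, 0xCAC1, 0xCB81, 0x0B40, 0xC901, 0x09C0, 0x0880, 0xC841,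
--     0xD801, 0x18C0, 0x1980, 0xD941, 0x1B00, 0xDBC1, 0xDA81, 0x1A40,
--     0x1E00, 0xDEC1, 0xDF81, 0x1F40, 0xDD01, 0x1DC0, 0x1C80, 0xDC41,
--     0x1400, 0xD4C1, 0xD581, 0x1540, 0xD701, 0x17C0, 0x1680, 0xD641,
--     0xD201, 0x12C0, 0x1380, 0xD341, 0x1100, 0xD1C1, 0xD081, 0x1040,
--     0xF001, 0x30C0, 0x3180, 0xF141, 0x3300, 0xF3C1, 0xF281, 0x3240,
--     0x3600, 0xF6C1, 0xF781, 0x3740, 0xF501, 0x35C0, 0x3480, 0xF441,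
--     0x3C00, 0xFCC1, 0xFD81, 0x3D40, 0xFF01, 0x3FC0, 0x3E80, 0xFE41,
--     0xFA01, 0x3AC0, 0x3B80, 0xFB41, 0x3900, 0xF9C1, 0xF881, 0x3840,
--     0x2800, 0xE8C1, 0xE981, 0x2940, 0xEB01, 0x2BC0, 0x2A80, 0xEA41,
--     0xEE01, 0x2EC0, 0x2F80, 0xEF41, 0x2D00, 0xEDC1, 0xEC81, 0x2C40,
--     0xE401, 0x24C0, 0x2580, 0xE541, 0x2700, 0xE7C1, 0xE681, 0x2640,
--     0x2200, 0xE2C1, 0xE381, 0x2340, 0xE101, 0x21C0, 0x2080, 0xE041,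
--     0xA001, 0x60C0, 0x6180, 0xA141, 0x6300, 0xA3C1, 0xA281, 0x6240,
--     0x6600, 0xA6C1, 0xA781, 0x6740, 0xA501, 0x65C0, 0x6480, 0xA441,
--     0x6C00, 0xACC1, 0xAD81, 0x6D40, 0xAF01, 0x6FC0, 0x6E80, 0xAE41,
--     0xAA01, 0x6AC0, 0x6B80, 0xAB41, 0x6900, 0xA9C1, 0xA881, 0x6840,
--     0x7800, 0xB8C1, 0xB981, 0x7940, 0xBB01, 0x7BC0, 0x7A80, 0xBA41,
--     0xBE01, 0x7EC0, 0x7F80, 0xBF41, 0x7D00, 0xBDC1, 0xBC81, 0x7C40,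
--     0xB401, 0x74C0, 0x7580, 0xB541, 0x7700, 0xB7C1, 0xB681, 0x7640,
--     0x7200, 0xB2C1, 0xB381, 0x7340, 0xB101, 0x71C0, 0x7080, 0xB041,
--     0x5000, 0x90C1, 0x9181, 0x5140, 0x9301, 0x53C0, 0x5280, 0x9241,
--     0x9601, 0x56C0, 0x5780, 0x9741, 0x5500, 0x95C1, 0x9481, 0x5440,
--     0x9C01, 0x5CC0, 0x5D80, 0x9D41, 0x5F00, 0x9FC1, 0x9E81, 0x5E40,
--     0x5A00, 0x9AC1, 0x9B81, 0x5B40, 0x9901, 0x59C0, 0x5880, 0x9841,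
--     0x8801, 0x48C0, 0x4980, 0x8941, 0x4B00, 0x8BC1, 0x8A81, 0x4A40,
--     0x4E00, 0x8EC1, 0x8F81, 0x4F40, 0x8D01, 0x4DC0, 0x4C80, 0x8C41,
--     0x4400, 0x84C1, 0x8581, 0x4540, 0x8701, 0x47C0, 0x4680, 0x8641,
--     0x8201, 0x42C0, 0x4380, 0x8341, 0x4100, 0x81C1, 0x8081, 0x4040
-- ]
--
-- def get_crc_from_string(istr,start_value):
--     ret_val = start_value
--     slen = len(istr)
--     for i in range(0,slen):
--         value = ord(istr[i])
--         if value != 0x20 and value != 0x0A and value != 0x0D: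
--             aval = value
--             index = ((ret_val ^ (aval & 0xFF)) & 0xff)
--             ret_val = (crc16tab[index] ^ ((ret_val >> 8) & 0xFF))
--     return ret_val
-- ===== SOURCE B (Python) =====
-- def get_crc_from_string(istr, start_value):
--     ret_val = start_value
--     for ch in istr:
--         value = ord(ch)
--         if value in (0x20, 0x0A, 0x0D):
--             continue
--         t = (ret_val ^ value) & 0xFF
--         for _ in range(8):
--             t = (t >> 1) ^ 0xA001 if t & 1 else t >> 1
--         ret_val = t ^ ((ret_val >> 8) & 0xFF)
--     return ret_val
-- ===== Notes on version B (the rewrite author's own statement) =====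
-- stated objective: simpler
-- what changed: Replaced the 256-entry crc16tab lookup with an inline bitwise CRC-16 computation: each processed character's index is run through 8 shift/xor rounds with polynomial 0xA001, so the table disappears.
import Mathlib
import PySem

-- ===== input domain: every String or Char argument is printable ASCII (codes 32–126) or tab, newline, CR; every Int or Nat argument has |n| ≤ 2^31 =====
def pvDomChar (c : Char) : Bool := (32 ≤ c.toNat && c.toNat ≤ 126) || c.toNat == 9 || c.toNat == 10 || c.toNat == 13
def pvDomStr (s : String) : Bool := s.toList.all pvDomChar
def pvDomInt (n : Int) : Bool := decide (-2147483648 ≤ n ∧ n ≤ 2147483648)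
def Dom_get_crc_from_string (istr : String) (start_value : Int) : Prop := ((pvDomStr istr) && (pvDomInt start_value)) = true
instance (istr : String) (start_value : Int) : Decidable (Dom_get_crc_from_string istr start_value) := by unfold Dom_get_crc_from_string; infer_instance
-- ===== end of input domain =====

-- B drops the 256-entry CRC table and computes each table value with 8 bitwise 0xA001 rounds: simpler, table-free, same O(n) cost.

-- ===== PORT A =====
def crc16tab : List Int := [
  0x0000, 0xC0C1, 0xC181, 0x0140, 0xC301, 0x03C0, 0x0280, 0xC241,
  0xC601, 0x06C0, 0x0780, 0xC741, 0x0500, 0xC5C1, 0xC481, 0x0440,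
  0xCC01, 0x0CC0, 0x0D80, 0xCD41, 0x0F00, 0xCFC1, 0xCE81, 0x0E40,
  0x0A00, 0xCAC1, 0xCB81, 0x0B40, 0xC901, 0x09C0, 0x0880, 0xC841,
  0xD801, 0x18C0, 0x1980, 0xD941, 0x1B00, 0xDBC1, 0xDA81, 0x1A40,
  0x1E00, 0xDEC1, 0xDF81, 0x1F40, 0xDD01, 0x1DC0, 0x1C80, 0xDC41,
  0x1400, 0xD4C1, 0xD581, 0x1540, 0xD701, 0x17C0, 0x1680, 0xD641,
  0xD201, 0x12C0, 0x1380, 0xD341, 0x1100, 0xD1C1, 0xD081, 0x1040,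
  0xF001, 0x30C0, 0x3180, 0xF141, 0x3300, 0xF3C1, 0xF281, 0x3240,
  0x3600, 0xF6C1, 0xF781, 0x3740, 0xF501, 0x35C0, 0x3480, 0xF441,
  0x3C00, 0xFCC1, 0xFD81, 0x3D40, 0xFF01, 0x3FC0, 0x3E80, 0xFE41,
  0xFA01, 0x3AC0, 0x3B80, 0xFB41, 0x3900, 0xF9C1, 0xF881, 0x3840,
  0x2800, 0xE8C1, 0xE981, 0x2940, 0xEB01, 0x2BC0, 0x2A80, 0xEA41,
  0xEE01, 0x2EC0, 0x2F80, 0xEF41, 0x2D00, 0xEDC1, 0xEC81, 0x2C40,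
  0xE401, 0x24C0, 0x2580, 0xE541, 0x2700, 0xE7C1, 0xE681, 0x2640,
  0x2200, 0xE2C1, 0xE381, 0x2340, 0xE101, 0x21C0, 0x2080, 0xE041,
  0xA001, 0x60C0, 0x6180, 0xA141, 0x6300, 0xA3C1, 0xA281, 0x6240,
  0x6600, 0xA6C1, 0xA781, 0x6740, 0xA501, 0x65C0, 0x6480, 0xA441,
  0x6C00, 0xACC1, 0xAD81, 0x6D40, 0xAF01, 0x6FC0, 0x6E80, 0xAE41,
  0xAA01, 0x6AC0, 0x6B80, 0xAB41, 0x6900, 0xA9C1, 0xA881, 0x6840,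
  0x7800, 0xB8C1, 0xB981, 0x7940, 0xBB01, 0x7BC0, 0x7A80, 0xBA41,
  0xBE01, 0x7EC0, 0x7F80, 0xBF41, 0x7D00, 0xBDC1, 0xBC81, 0x7C40,
  0xB401, 0x74C0, 0x7580, 0xB541, 0x7700, 0xB7C1, 0xB681, 0x7640,
  0x7200, 0xB2C1, 0xB381, 0x7340, 0xB101, 0x71C0, 0x7080, 0xB041,
  0x5000, 0x90C1, 0x9181, 0x5140, 0x9301, 0x53C0, 0x5280, 0x9241,
  0x9601, 0x56C0, 0x5780, 0x9741, 0x5500, 0x95C1, 0x9481, 0x5440,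
  0x9C01, 0x5CC0, 0x5D80, 0x9D41, 0x5F00, 0x9FC1, 0x9E81, 0x5E40,
  0x5A00, 0x9AC1, 0x9B81, 0x5B40, 0x9901, 0x59C0, 0x5880, 0x9841,
  0x8801, 0x48C0, 0x4980, 0x8941, 0x4B00, 0x8BC1, 0x8A81, 0x4A40,
  0x4E00, 0x8EC1, 0x8F81, 0x4F40, 0x8D01, 0x4DC0, 0x4C80, 0x8C41,
  0x4400, 0x84C1, 0x8581, 0x4540, 0x8701, 0x47C0, 0x4680, 0x8641,
  0x8201, 0x42C0, 0x4380, 0x8341, 0x4100, 0x81C1, 0x8081, 0x4040]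

-- Port of A: fold over the characters; crc16tab[index] is total here because index = _ & 0xff is always in range.
def get_crc_from_string (istr : String) (start_value : Int) : Int :=
  istr.toList.foldl (fun ret_val c =>
    let value : Int := (c.toNat : Int)
    if value ≠ 0x20 ∧ value ≠ 0x0A ∧ value ≠ 0x0D then
      let aval := value
      let index := PySem.Int.band (PySem.Int.bxor ret_val (PySem.Int.band aval 0xFF)) 0xff
      PySem.Int.bxor (PySem.List.pyGetD crc16tab index 0) (PySem.Int.band (ret_val >>> 8) 0xFF)
    else ret_val) start_value

-- ===== PORT B =====
-- one bitwise CRC round: t = (t >> 1) ^ 0xA001 if t & 1 else t >> 1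
def crcRound (t : Int) : Int :=
  if PySem.Int.band t 1 ≠ 0 then PySem.Int.bxor (t >>> 1) 0xA001 else t >>> 1

-- eight rounds (B's inner 'for _ in range(8)' loop)
def crc8 (t : Int) : Int := (List.range 8).foldl (fun t _ => crcRound t) t

def get_crc_from_string_alt (istr : String) (start_value : Int) : Int :=
  istr.toList.foldl (fun ret_val c =>
    let value : Int := (c.toNat : Int)
    if value = 0x20 ∨ value = 0x0A ∨ value = 0x0D then ret_val
    else
      let t := crc8 (PySem.Int.band (PySem.Int.bxor ret_val value) 0xFF)
      PySem.Int.bxor t (PySem.Int.band (ret_val >>> 8) 0xFF)) start_value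

-- ===== PRECONDITION & SPEC =====
def Spec_get_crc_from_string (istr : String) (start_value : Int) (out : Int) : Prop := out = get_crc_from_string_alt istr start_value
instance (istr : String) (start_value : Int) (out : Int) : Decidable (Spec_get_crc_from_string istr start_value out) := by unfold Spec_get_crc_from_string; infer_instance

-- ===== CLAIM (what is proved, stated in full; the proofs are below) =====
def Claim_equal_get_crc_from_string : Prop := ∀ (istr : String) (start_value : Int), Dom_get_crc_from_string istr start_value → Spec_get_crc_from_string istr start_value (get_crc_from_string istr start_value)

-- ===== LEMMAS AND PROOFS =====

-- Python's  a & 0xff  is  a % 256  (floor mod), for every Int a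
theorem band_255_eq_mod (a : Int) : PySem.Int.band a 255 = PySem.Int.mod a 256 := by
  rw [PySem.Int.mod_eq_emod_of_pos (by norm_num)]
  unfold PySem.Int.band
  by_cases h : 0 ≤ a
  · simp only [h, if_pos, show (0:Int) ≤ 255 by norm_num]
    have hm : a.toNat &&& (255:Int).toNat = a.toNat % 256 := by
      simpa using Nat.and_two_pow_sub_one_eq_mod a.toNat 8
    rw [hm]; omega
  · simp only [h, if_false, if_pos, show (0:Int) ≤ 255 by norm_num]
    have hm : (255:Int).toNat &&& (-a - 1).toNat = (-a - 1).toNat % 256 := by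
      rw [Nat.and_comm]
      simpa using Nat.and_two_pow_sub_one_eq_mod (-a - 1).toNat 8
    rw [hm]; omega

-- the 256-entry table IS eight bitwise rounds of the 0xA001 polynomial
set_option maxRecDepth 100000 in
theorem table_eq_crc8_fin : ∀ i : Fin 256, PySem.List.pyGetD crc16tab (i : Int) 0 = crc8 (i : Int) := by decide

theorem table_eq_crc8 (n : Int) (h0 : 0 ≤ n) (h1 : n < 256) :
    PySem.List.pyGetD crc16tab n 0 = crc8 n := by
  have := table_eq_crc8_fin ⟨n.toNat, by omega⟩
  simpa [show ((⟨n.toNat, by omega⟩ : Fin 256) : Int) = n by simp; omega] using this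

-- one step of A's loop equals one step of B's loop, for a character below 256
theorem step_eq (ret : Int) (c : Char) (hc : c.toNat < 256) :
    (let value : Int := (c.toNat : Int)
     if value ≠ 0x20 ∧ value ≠ 0x0A ∧ value ≠ 0x0D then
       PySem.Int.bxor (PySem.List.pyGetD crc16tab
         (PySem.Int.band (PySem.Int.bxor ret (PySem.Int.band value 0xFF)) 0xff) 0)
         (PySem.Int.band (ret >>> 8) 0xFF)
     else ret)
    = (let value : Int := (c.toNat : Int)
       if value = 0x20 ∨ value = 0x0A ∨ value = 0x0D then ret
       else PySem.Int.bxor (crc8 (PySem.Int.band (PySem.Int.bxor ret value) 0xFF))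
             (PySem.Int.band (ret >>> 8) 0xFF)) := by
  simp only []
  by_cases h : ((c.toNat : Int) = 0x20 ∨ (c.toNat : Int) = 0x0A ∨ (c.toNat : Int) = 0x0D)
  · rw [if_neg (by tauto), if_pos h]
  · rw [if_pos (by tauto), if_neg h]
    have hv : PySem.Int.band ((c.toNat : Int)) 0xFF = (c.toNat : Int) := by
      rw [show (0xFF : Int) = 255 from rfl, band_255_eq_mod,
        PySem.Int.mod_eq_emod_of_pos (by norm_num)]
      omega
    rw [hv]
    have h0 : 0 ≤ PySem.Int.band (PySem.Int.bxor ret (c.toNat : Int)) 0xFF := by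
      rw [show (0xFF : Int) = 255 from rfl, band_255_eq_mod]
      exact PySem.Int.mod_nonneg _ (by norm_num)
    have h1 : PySem.Int.band (PySem.Int.bxor ret (c.toNat : Int)) 0xFF < 256 := by
      rw [show (0xFF : Int) = 255 from rfl, band_255_eq_mod]
      exact PySem.Int.mod_lt _ (by norm_num)
    rw [table_eq_crc8 _ h0 h1]

theorem foldl_eq (l : List Char) (s : Int) (hl : ∀ c ∈ l, c.toNat < 256) :
    l.foldl (fun ret_val c =>
      let value : Int := (c.toNat : Int)
      if value ≠ 0x20 ∧ value ≠ 0x0A ∧ value ≠ 0x0D then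
        let aval := value
        let index := PySem.Int.band (PySem.Int.bxor ret_val (PySem.Int.band aval 0xFF)) 0xff
        PySem.Int.bxor (PySem.List.pyGetD crc16tab index 0) (PySem.Int.band (ret_val >>> 8) 0xFF)
      else ret_val) s
    = l.foldl (fun ret_val c =>
      let value : Int := (c.toNat : Int)
      if value = 0x20 ∨ value = 0x0A ∨ value = 0x0D then ret_val
      else
        let t := crc8 (PySem.Int.band (PySem.Int.bxor ret_val value) 0xFF)
        PySem.Int.bxor t (PySem.Int.band (ret_val >>> 8) 0xFF)) s := by
  induction l generalizing s with
  | nil => rfl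
  | cons c l ih =>
    simp only [List.foldl_cons]
    rw [show (let value : Int := (c.toNat : Int)
      if value ≠ 0x20 ∧ value ≠ 0x0A ∧ value ≠ 0x0D then
        let aval := value
        let index := PySem.Int.band (PySem.Int.bxor s (PySem.Int.band aval 0xFF)) 0xff
        PySem.Int.bxor (PySem.List.pyGetD crc16tab index 0) (PySem.Int.band (s >>> 8) 0xFF)
      else s) = _ from step_eq s c (hl c (by simp))]
    exact ih _ (fun c hc => hl c (by simp [hc]))

-- ===== VERDICT (by name: the statement is the Claim_ definition above) =====
theorem get_crc_from_string_spec : Claim_equal_get_crc_from_string := by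
  intro istr start_value hdom
  unfold Spec_get_crc_from_string get_crc_from_string get_crc_from_string_alt
  apply foldl_eq
  intro c hc
  have : pvDomChar c = true := by
    have := hdom
    unfold Dom_get_crc_from_string pvDomStr at this
    simp only [Bool.and_eq_true, List.all_eq_true] at this
    exact this.1 c hc
  unfold pvDomChar at this
  simp at this
  omega
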